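-- pv_equiv track=rewrite | github.com/abiyaddisM/A2SV-Questions | Week 6/Day 2/835. Image Overlap(LeetCode).py | largestOverlap
-- ===== SOURCE A (Python) =====
-- from typing import List
--
-- def largestOverlap(img1: List[List[int]], img2: List[List[int]]) -> int:
--     r1 = [(i,j) for i in range(len(img1)) for j in range(len(img1)) if img1[i][j]]
--     r2 = [(i,j) for i in range(len(img2)) for j in range(len(img2)) if img2[i][j]]
--     dic = {}
--     for a, b in r1:
--         for c, d in r2:
--             out = (a - c, b - d)
--             dic[out] = dic.get(out,0) + 1
--     return max(dic.values() or [0])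
-- ===== SOURCE B (Python) =====
-- from typing import List
--
-- def largestOverlap(img1: List[List[int]], img2: List[List[int]]) -> int:
--     n1, n2 = len(img1), len(img2)
--     best = 0
--     for dx in range(-(n2 - 1), n1):
--         for dy in range(-(n2 - 1), n1):
--             cnt = 0
--             for i in range(n1):
--                 for j in range(n1):
--                     c, d = i - dx, j - dy
--                     if 0 <= c < n2 and 0 <= d < n2 and img1[i][j] and img2[c][d]:
--                         cnt += 1
--             if cnt > best:
--                 best = cnt
--     return best
-- ===== Notes on version B (the rewrite author's own statement) =====
-- stated objective: alternative
-- what changed: Replaces the delta-histogram dictionary over all pairs of 1-cells with a direct enumeration of every translation offset (dx,dy), counting bounds-checked matching 1-positions per offset and keeping the running maximum.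
import Mathlib
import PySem

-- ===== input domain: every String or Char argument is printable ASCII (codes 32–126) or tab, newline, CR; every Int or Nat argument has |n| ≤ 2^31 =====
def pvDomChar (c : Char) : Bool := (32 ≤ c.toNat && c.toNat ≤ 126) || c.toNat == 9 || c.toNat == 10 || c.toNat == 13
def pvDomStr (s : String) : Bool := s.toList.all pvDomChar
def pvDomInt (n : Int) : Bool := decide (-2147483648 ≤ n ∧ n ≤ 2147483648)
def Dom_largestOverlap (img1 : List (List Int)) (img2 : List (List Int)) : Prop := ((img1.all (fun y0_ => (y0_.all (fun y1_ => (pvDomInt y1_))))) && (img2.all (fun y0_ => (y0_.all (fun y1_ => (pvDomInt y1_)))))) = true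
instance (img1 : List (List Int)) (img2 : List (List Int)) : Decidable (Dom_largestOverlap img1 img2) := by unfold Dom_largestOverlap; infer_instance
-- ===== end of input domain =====

-- B replaces A's delta-histogram dictionary over all pairs of 1-cells by a direct enumeration of
-- every translation offset, counting the bounds-checked matching cells per offset (alternative
-- algorithm, similar cost on these inputs).

-- ===== PORT A =====
-- img[i][j] read with Python indexing; Pre_ keeps every such access in range, where pyGetD = the Python value
def pvEntry (img : List (List Int)) (i j : Int) : Int :=
  PySem.List.pyGetD (PySem.List.pyGetD img i []) j 0

-- [(i,j) for i in range(len(img)) for j in range(len(img)) if img[i][j]]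
def pvOnes (img : List (List Int)) : List (Int × Int) :=
  (PySem.List.pyRange 0 img.length).flatMap (fun i =>
    ((PySem.List.pyRange 0 img.length).filter (fun j => pvEntry img i j != 0)).map (fun j => (i, j)))

def largestOverlap (img1 : List (List Int)) (img2 : List (List Int)) : Int :=
  let r1 := pvOnes img1
  let r2 := pvOnes img2
  let dic := r1.foldl (fun d p => r2.foldl (fun d q =>
      let out := (p.1 - q.1, p.2 - q.2)
      d.insert out (d.getD out 0 + 1)) d) PySem.Dict.empty
  -- max(dic.values() or [0]): the values list is empty exactly when dic is empty
  (PySem.List.max? dic.values id).getD 0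

-- ===== PORT B =====
def largestOverlap_alt (img1 : List (List Int)) (img2 : List (List Int)) : Int :=
  let n1 : Int := img1.length
  let n2 : Int := img2.length
  (PySem.List.pyRange (-(n2 - 1)) n1).foldl (fun best dx =>
    (PySem.List.pyRange (-(n2 - 1)) n1).foldl (fun best dy =>
      let cnt := (PySem.List.pyRange 0 n1).foldl (fun c i =>
        (PySem.List.pyRange 0 n1).foldl (fun c j =>
          if 0 ≤ i - dx ∧ i - dx < n2 ∧ 0 ≤ j - dy ∧ j - dy < n2 ∧
             pvEntry img1 i j ≠ 0 ∧ pvEntry img2 (i - dx) (j - dy) ≠ 0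
          then c + 1 else c) c) 0
      if cnt > best then cnt else best) best) 0

-- ===== PRECONDITION & SPEC =====
-- Pre_ excludes exactly the inputs on which Python A raises IndexError: some row shorter than the
-- number of rows of its image (A reads img[i][j] for all i, j < len(img)).
def Pre_largestOverlap (img1 : List (List Int)) (img2 : List (List Int)) : Prop :=
  (∀ row ∈ img1, img1.length ≤ row.length) ∧ (∀ row ∈ img2, img2.length ≤ row.length)
instance (img1 : List (List Int)) (img2 : List (List Int)) : Decidable (Pre_largestOverlap img1 img2) := by unfold Pre_largestOverlap; infer_instance

def pvWitness_largestOverlap : List (List Int) × List (List Int) :=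
  ([[1, 0], [0, 1]], [[0, 1], [1, 0]])

def Spec_largestOverlap (img1 : List (List Int)) (img2 : List (List Int)) (out : Int) : Prop := out = largestOverlap_alt img1 img2
instance (img1 : List (List Int)) (img2 : List (List Int)) (out : Int) : Decidable (Spec_largestOverlap img1 img2 out) := by unfold Spec_largestOverlap; infer_instance

-- ===== CLAIM (what is proved, stated in full; the proofs are below) =====
def Claim_equal_largestOverlap : Prop := ∀ (img1 : List (List Int)) (img2 : List (List Int)), Dom_largestOverlap img1 img2 → Pre_largestOverlap img1 img2 → Spec_largestOverlap img1 img2 (largestOverlap img1 img2)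

-- ===== LEMMAS AND PROOFS =====

-- the n×n index grid as a product list
def pvGrid (n : Int) : List (Int × Int) :=
  (PySem.List.pyRange 0 n) ×ˢ (PySem.List.pyRange 0 n)

-- the flat list of coordinate deltas A histograms
def pvDeltas (img1 img2 : List (List Int)) : List (Int × Int) :=
  (pvOnes img1).flatMap (fun p => (pvOnes img2).map (fun q => (p.1 - q.1, p.2 - q.2)))

lemma pv_mem_grid (n : Int) (p : Int × Int) :
    p ∈ pvGrid n ↔ (0 ≤ p.1 ∧ p.1 < n) ∧ (0 ≤ p.2 ∧ p.2 < n) := by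
  obtain ⟨a, b⟩ := p
  simp [pvGrid, List.mem_product, PySem.List.mem_pyRange_one]

lemma pv_ones_eq_filter (img : List (List Int)) :
    pvOnes img = (pvGrid img.length).filter (fun p => pvEntry img p.1 p.2 != 0) := by
  unfold pvOnes pvGrid
  rw [show (PySem.List.pyRange 0 (img.length : Int)) ×ˢ (PySem.List.pyRange 0 (img.length : Int))
        = (PySem.List.pyRange 0 (img.length : Int)).flatMap
            (fun a => (PySem.List.pyRange 0 (img.length : Int)).map (Prod.mk a)) from rfl,
      List.filter_flatMap]
  simp only [List.filter_map]
  rfl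

lemma pv_mem_ones (img : List (List Int)) (p : Int × Int) :
    p ∈ pvOnes img ↔ (0 ≤ p.1 ∧ p.1 < (img.length : Int)) ∧ (0 ≤ p.2 ∧ p.2 < (img.length : Int))
      ∧ pvEntry img p.1 p.2 ≠ 0 := by
  rw [pv_ones_eq_filter]
  simp [List.mem_filter, pv_mem_grid]
  tauto

lemma pv_nodup_pyRange (n : Int) : (PySem.List.pyRange 0 n).Nodup := by
  by_cases h : 0 ≤ n
  · obtain ⟨m, rfl⟩ := Int.eq_ofNat_of_zero_le h
    rw [PySem.List.pyRange_zero_natCast]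
    exact (List.nodup_range).map (fun a b => by omega)
  · have h0 : PySem.List.pyRange 0 n = [] := by
      simp [PySem.List.pyRange]; omega
    simp [h0]

lemma pv_nodup_ones (img : List (List Int)) : (pvOnes img).Nodup := by
  rw [pv_ones_eq_filter]
  exact ((pv_nodup_pyRange _).product (pv_nodup_pyRange _)).filter _

-- B's bounds-checked cell condition for offset o at grid position pr, as one Bool
def pvCond (img1 img2 : List (List Int)) (o pr : Int × Int) : Bool :=
  decide (0 ≤ pr.1 - o.1 ∧ pr.1 - o.1 < (img2.length : Int) ∧ 0 ≤ pr.2 - o.2 ∧ pr.2 - o.2 < (img2.length : Int) ∧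
    pvEntry img1 pr.1 pr.2 ≠ 0 ∧ pvEntry img2 (pr.1 - o.1) (pr.2 - o.2) ≠ 0)

-- pointwise-equal step functions fold alike
lemma pv_foldl_fcongr {α β : Type} (l : List α) (f g : β → α → β) (b : β)
    (h : ∀ x y, f x y = g x y) : l.foldl f b = l.foldl g b := by
  have hfg : f = g := funext fun x => funext fun y => h x y
  rw [hfg]

-- summing the multiplicity of s p in a duplicate-free list counts the p with s p a member
lemma pv_sum_count_nodup {α β : Type} [BEq β] [LawfulBEq β] (r1 : List α) (r2 : List β) (s : α → β)
    (h : r2.Nodup) : (r1.map (fun p => r2.count (s p))).sum = r1.countP (fun p => r2.contains (s p)) := by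
  induction r1 with
  | nil => rfl
  | cons p ps ih =>
    simp only [List.map_cons, List.sum_cons, List.countP_cons, ih]
    by_cases hm : s p ∈ r2
    · simp [List.count_eq_one_of_mem h hm, hm, Nat.add_comm]
    · simp [List.count_eq_zero.mpr hm, hm]

-- the count of one delta in A's flat delta list, as a grid count
lemma pv_count_deltas_eq_grid (img1 img2 : List (List Int)) (o : Int × Int) :
    (pvDeltas img1 img2).count o = (pvGrid (img1.length : Int)).countP (pvCond img1 img2 o) := by
  have h1 : (pvDeltas img1 img2).count o
      = ((pvOnes img1).map (fun p => (pvOnes img2).count (p.1 - o.1, p.2 - o.2))).sum := by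
    unfold pvDeltas
    rw [List.count_flatMap]
    congr 1
    apply List.map_congr_left
    intro p _
    simp only [Function.comp, List.count_eq_countP, List.countP_map]
    apply List.countP_congr
    intro q _
    obtain ⟨a, b⟩ := o; obtain ⟨c, d⟩ := q
    simp only [Function.comp, beq_iff_eq, Prod.mk.injEq, Prod.ext_iff]
    constructor <;> intro h <;> constructor <;> omega
  rw [h1, pv_sum_count_nodup _ _ _ (pv_nodup_ones img2), pv_ones_eq_filter img1, List.countP_filter]
  apply List.countP_congr
  intro pr hpr
  have hg := (pv_mem_grid _ pr).mp hpr
  constructor <;> intro hq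
  · simp only [Bool.and_eq_true, List.contains_iff_mem, bne_iff_ne] at hq
    obtain ⟨hmem, hne⟩ := hq
    have hm := (pv_mem_ones img2 _).mp hmem
    apply decide_eq_true
    exact ⟨hm.1.1, hm.1.2, hm.2.1.1, hm.2.1.2, hne, hm.2.2⟩
  · have h := of_decide_eq_true hq
    simp only [Bool.and_eq_true, List.contains_iff_mem, bne_iff_ne]
    exact ⟨(pv_mem_ones img2 _).mpr ⟨⟨h.1, h.2.1⟩, ⟨h.2.2.1, h.2.2.2.1⟩, h.2.2.2.2.2⟩, h.2.2.2.2.1⟩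

-- B's inner double loop computes the same grid count
lemma pv_inner_count (img1 img2 : List (List Int)) (o : Int × Int) :
    (PySem.List.pyRange 0 (img1.length : Int)).foldl (fun c i =>
      (PySem.List.pyRange 0 (img1.length : Int)).foldl (fun c j =>
        if 0 ≤ i - o.1 ∧ i - o.1 < (img2.length : Int) ∧ 0 ≤ j - o.2 ∧ j - o.2 < (img2.length : Int) ∧
           pvEntry img1 i j ≠ 0 ∧ pvEntry img2 (i - o.1) (j - o.2) ≠ 0
        then c + 1 else c) c) 0
    = ((pvGrid (img1.length : Int)).countP (pvCond img1 img2 o) : Int) := by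
  have hinner : ∀ (c i : Int),
      (PySem.List.pyRange 0 (img1.length : Int)).foldl (fun c j =>
        if 0 ≤ i - o.1 ∧ i - o.1 < (img2.length : Int) ∧ 0 ≤ j - o.2 ∧ j - o.2 < (img2.length : Int) ∧
           pvEntry img1 i j ≠ 0 ∧ pvEntry img2 (i - o.1) (j - o.2) ≠ 0
        then c + 1 else c) c
      = c + (((PySem.List.pyRange 0 (img1.length : Int)).countP (fun j => pvCond img1 img2 o (i, j))) : Int) := by
    intro c i
    rw [pv_foldl_fcongr (PySem.List.pyRange 0 (img1.length : Int)) _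
      (fun c j => if (fun j => pvCond img1 img2 o (i, j)) j = true then c + 1 else c) c
      (by intro x y; simp [pvCond])]
    exact PySem.List.foldl_count_if _ _ c
  rw [pv_foldl_fcongr (PySem.List.pyRange 0 (img1.length : Int)) _
    (fun c i => c + (((PySem.List.pyRange 0 (img1.length : Int)).countP (fun j => pvCond img1 img2 o (i, j))) : Int)) 0
    (fun c i => hinner c i)]
  rw [PySem.List.foldl_add]
  have hg : pvGrid (img1.length : Int)
      = (PySem.List.pyRange 0 (img1.length : Int)).flatMap
          (fun i => (PySem.List.pyRange 0 (img1.length : Int)).map (Prod.mk i)) := rfl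
  rw [hg, List.countP_flatMap]
  rw [show (List.countP (pvCond img1 img2 o) ∘ fun i => List.map (Prod.mk i) (PySem.List.pyRange 0 (img1.length : Int)))
      = (fun i => List.countP (fun j => pvCond img1 img2 o (i, j)) (PySem.List.pyRange 0 (img1.length : Int))) from by
    funext i
    simp only [Function.comp_apply]
    rw [List.countP_map]
    congr 1]
  push_cast
  rw [zero_add, List.map_map]
  congr 1

-- membership in A's delta list implies membership in B's offset rectangle
lemma pv_deltas_sub (img1 img2 : List (List Int)) (x : Int × Int) (hx : x ∈ pvDeltas img1 img2) :
    (-((img2.length : Int) - 1) ≤ x.1 ∧ x.1 < (img1.length : Int)) ∧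
    (-((img2.length : Int) - 1) ≤ x.2 ∧ x.2 < (img1.length : Int)) := by
  unfold pvDeltas at hx
  simp only [List.mem_flatMap, List.mem_map] at hx
  obtain ⟨p, hp, q, hq, rfl⟩ := hx
  have h1 := (pv_mem_ones img1 p).mp hp
  have h2 := (pv_mem_ones img2 q).mp hq
  constructor <;> constructor <;> simp <;> omega

-- fold of max bounded above
lemma pv_foldl_max_le (t : List Int) (a c : Int) (ha : a ≤ c) (h : ∀ y ∈ t, y ≤ c) :
    t.foldl max a ≤ c := by
  induction t generalizing a with
  | nil => exact ha
  | cons x xs ih =>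
    exact ih _ (max_le ha (h x (by simp))) (fun y hy => h y (by simp [hy]))

-- Python's max over a nonempty list returns some value
lemma pv_max?_isSome {α κ : Type} [LT κ] [DecidableLT κ] (l : List α) (key : α → κ) (hl : l ≠ []) :
    ∃ m, PySem.List.max? l key = some m := by
  have go : ∀ (t : List α) (a : α), ∃ m,
      t.foldl (fun acc x => match acc with
        | none => some x
        | some m => if key m < key x then some x else some m) (some a) = some m := by
    intro t
    induction t with
    | nil => intro a; exact ⟨a, rfl⟩
    | cons x xs ih =>
      intro a
      simp only [List.foldl_cons]
      split <;> exact ih _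
  cases l with
  | nil => exact absurd rfl hl
  | cons x xs => exact go xs x

-- max of the histogram over the distinct deltas = fold of max of the counts over any superset
lemma pv_max_core (offs L : List (Int × Int)) (hsub : ∀ x ∈ L, x ∈ offs) :
    (PySem.List.max? ((PySem.Set.ofList L).map (fun k => (L.count k : Int))) id).getD 0
      = offs.foldl (fun b o => max b ((L.count o : Int))) 0 := by
  have hrw : offs.foldl (fun b o => max b ((L.count o : Int))) 0
      = (offs.map (fun o => (L.count o : Int))).foldl max 0 := by
    rw [List.foldl_map]
  rw [hrw]
  set f : Int × Int → Int := fun o => (L.count o : Int) with hf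
  have hnonneg : (0 : Int) ≤ (PySem.List.max? ((PySem.Set.ofList L).map f) id).getD 0 := by
    cases hm : PySem.List.max? ((PySem.Set.ofList L).map f) id with
    | none => simp
    | some m =>
      have := PySem.List.max?_mem hm
      obtain ⟨k, _, rfl⟩ := List.mem_map.mp this
      simp [hf]
  apply le_antisymm
  · cases hm : PySem.List.max? ((PySem.Set.ofList L).map f) id with
    | none => simpa using (PySem.List.le_foldl_max (offs.map f) 0).1
    | some m =>
      have hmem := PySem.List.max?_mem hm
      obtain ⟨k, hk, rfl⟩ := List.mem_map.mp hmem
      have hkL : k ∈ L := (PySem.Set.mem_ofList L k).mp hk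
      exact (PySem.List.le_foldl_max (offs.map f) 0).2 _ (List.mem_map.mpr ⟨k, hsub k hkL, rfl⟩)
  · apply pv_foldl_max_le _ _ _ hnonneg
    intro y hy
    obtain ⟨ofs, ho, rfl⟩ := List.mem_map.mp hy
    by_cases hL : ofs ∈ L
    · have hset : f ofs ∈ (PySem.Set.ofList L).map f :=
        List.mem_map.mpr ⟨ofs, (PySem.Set.mem_ofList L ofs).mpr hL, rfl⟩
      obtain ⟨m, hm⟩ := pv_max?_isSome ((PySem.Set.ofList L).map f) id
        (by intro hnil; rw [hnil] at hset; simp at hset)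
      rw [hm]
      simpa using PySem.List.max?_isMax hm _ hset
    · have : f ofs = 0 := by simp [hf, List.count_eq_zero.mpr hL]
      rw [this]
      exact hnonneg

-- Python's "cnt if cnt > best else best" is max
lemma pv_if_max (b x : Int) : (if x > b then x else b) = max b x := by
  by_cases h : x > b
  · simp [h, max_eq_right h.le]
  · simp [h, max_eq_left (not_lt.mp h)]

-- A's dictionary loop builds the counter of the flat delta list
lemma pv_dic_eq_counter (img1 img2 : List (List Int)) :
    (pvOnes img1).foldl (fun d p => (pvOnes img2).foldl (fun d q =>
      let out := (p.1 - q.1, p.2 - q.2)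
      d.insert out (d.getD out 0 + 1)) d) PySem.Dict.empty
    = PySem.Dict.counter (pvDeltas img1 img2) := by
  have h1 := pv_foldl_fcongr (β := PySem.Dict (Int × Int) Int) (pvOnes img1)
    (fun d p => (pvOnes img2).foldl (fun d q =>
      let out := (p.1 - q.1, p.2 - q.2)
      d.insert out (d.getD out 0 + 1)) d)
    (fun d p => ((pvOnes img2).map (fun q => (p.1 - q.1, p.2 - q.2))).foldl
      (fun d x => d.insert x (d.getD x 0 + 1)) d) PySem.Dict.empty
    (fun d p => (List.foldl_map (f := fun q => (p.1 - q.1, p.2 - q.2))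
      (g := fun (d : PySem.Dict (Int × Int) Int) x => d.insert x (d.getD x 0 + 1))
      (l := pvOnes img2) (init := d)).symm)
  refine h1.trans ?_
  rw [← List.foldl_flatMap]
  exact PySem.Dict.foldl_insert_getD_add_one_eq_counter _

-- the two ports agree
lemma pv_max_eq (img1 img2 : List (List Int)) :
    largestOverlap img1 img2 = largestOverlap_alt img1 img2 := by
  have hcnt : ∀ o : Int × Int,
      (PySem.List.pyRange 0 (img1.length : Int)).foldl (fun c i =>
        (PySem.List.pyRange 0 (img1.length : Int)).foldl (fun c j =>
          if 0 ≤ i - o.1 ∧ i - o.1 < (img2.length : Int) ∧ 0 ≤ j - o.2 ∧ j - o.2 < (img2.length : Int) ∧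
             pvEntry img1 i j ≠ 0 ∧ pvEntry img2 (i - o.1) (j - o.2) ≠ 0
          then c + 1 else c) c) 0
      = ((pvDeltas img1 img2).count o : Int) := by
    intro o
    rw [pv_inner_count img1 img2 o, pv_count_deltas_eq_grid img1 img2 o]
  have hvals : (PySem.Dict.counter (pvDeltas img1 img2)).values
      = (PySem.Set.ofList (pvDeltas img1 img2)).map (fun k => ((pvDeltas img1 img2).count k : Int)) := by
    show ((PySem.Dict.counter (pvDeltas img1 img2)).items.map (·.2)) = _
    rw [PySem.Dict.items_counter, List.map_map]
    rfl
  have hoffs : ∀ x ∈ pvDeltas img1 img2,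
      x ∈ (PySem.List.pyRange (-((img2.length : Int) - 1)) (img1.length : Int)).flatMap
        (fun dx => (PySem.List.pyRange (-((img2.length : Int) - 1)) (img1.length : Int)).map (Prod.mk dx)) := by
    intro x hx
    have h := pv_deltas_sub img1 img2 x hx
    obtain ⟨a, b⟩ := x
    simp only [List.mem_flatMap, List.mem_map, PySem.List.mem_pyRange_one]
    exact ⟨a, ⟨h.1.1, h.1.2⟩, b, ⟨h.2.1, h.2.2⟩, rfl⟩
  simp only [largestOverlap, largestOverlap_alt]
  rw [pv_dic_eq_counter, hvals, pv_max_core _ (pvDeltas img1 img2) hoffs, List.foldl_flatMap]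
  apply pv_foldl_fcongr
  intro b dx
  rw [List.foldl_map]
  apply pv_foldl_fcongr
  intro b dy
  rw [← hcnt (dx, dy), ← pv_if_max]

-- ===== VERDICT (by name: the statement is the Claim_ definition above) =====
theorem largestOverlap_spec : Claim_equal_largestOverlap := by
  intro img1 img2 _ _
  unfold Spec_largestOverlap
  exact pv_max_eq img1 img2
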